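-- pv_equiv track=rewrite | github.com/410773004/parsingAI | compress.py | compress_metric_patrol_loop
-- ===== SOURCE A (Python) =====
-- def is_metric_pair(line1: str, line2: str) -> bool:
--     return (
--         line1.startswith("get_avg_erase_cnt()")
--         and line2.startswith("get_host_ns_spare_cnt()")
--     )
--
-- def is_patrol_block(line: str) -> bool:
--     return "patrol_read() - blank block flag" in line
--
-- def compress_metric_patrol_loop(lines: list[str]) -> list[str]:
--     out = []
--     i = 0
--     n = len(lines)
--
--     while i < n:
--         if i + 2 < n:
--             l1 = lines[i]
--             l2 = lines[i + 1]
--             l3 = lines[i + 2]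
--
--             if is_metric_pair(l1, l2) and is_patrol_block(l3):
--                 count = 1
--                 j = i + 3
--
--                 while j + 2 < n:
--                     n1 = lines[j]
--                     n2 = lines[j + 1]
--                     n3 = lines[j + 2]
--
--                     if is_metric_pair(n1, n2) and is_patrol_block(n3):
--                         count += 1
--                         j += 3
--                     else:
--                         break
--
--                 if count == 1:
--                     out.extend([l1, l2, l3])
--                 else:
--                     out.append(f"[{count}x loop]")
--                     out.append("{")
--                     out.append("get_avg_erase_cnt() - A: *, Max: *, Min: *, t: *")
--                     out.append(
--                         "get_host_ns_spare_cnt() - y_avail:* spare:* host_need_spb_cnt:* host op:* unalloc pool cnt: *"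
--                     )
--                     out.append("patrol_read() - blank block flag *, skip it")
--                     out.append("}")
--
--                 i = j
--                 continue
--
--         out.append(lines[i])
--         i += 1
--
--     return out
-- ===== SOURCE B (Python) =====
-- def is_metric_pair(line1: str, line2: str) -> bool:
--     return (
--         line1.startswith("get_avg_erase_cnt()")
--         and line2.startswith("get_host_ns_spare_cnt()")
--     )
--
-- def is_patrol_block(line: str) -> bool:
--     return "patrol_read() - blank block flag" in line
--
-- _MARKER_TAIL = [
--     "{",
--     "get_avg_erase_cnt() - A: *, Max: *, Min: *, t: *",
--     "get_host_ns_spare_cnt() - y_avail:* spare:* host_need_spb_cnt:* host op:* unalloc pool cnt: *",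
--     "patrol_read() - blank block flag *, skip it",
--     "}",
-- ]
--
-- def _flush(lines, count, run_start, out):
--     if count == 1:
--         out.extend(lines[run_start:run_start + 3])
--     elif count > 1:
--         out.append(f"[{count}x loop]")
--         out.extend(_MARKER_TAIL)
--
-- def compress_metric_patrol_loop(lines: list[str]) -> list[str]:
--     out = []
--     n = len(lines)
--     i = 0
--     count = 0
--     run_start = 0
--     while i < n:
--         if (i + 2 < n
--                 and is_metric_pair(lines[i], lines[i + 1])
--                 and is_patrol_block(lines[i + 2])):
--             if count == 0:
--                 run_start = i
--             count += 1
--             i += 3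
--         else:
--             _flush(lines, count, run_start, out)
--             count = 0
--             out.append(lines[i])
--             i += 1
--     _flush(lines, count, run_start, out)
--     return out
-- ===== Notes on version B (the rewrite author's own statement) =====
-- stated objective: simpler
-- what changed: Replaces the nested while loops (outer scan plus inner run-counting rescan) with a single forward pass that carries a pending-run state (count, run_start) and flushes it when a non-matching position is reached or the input ends.
import Mathlib
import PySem

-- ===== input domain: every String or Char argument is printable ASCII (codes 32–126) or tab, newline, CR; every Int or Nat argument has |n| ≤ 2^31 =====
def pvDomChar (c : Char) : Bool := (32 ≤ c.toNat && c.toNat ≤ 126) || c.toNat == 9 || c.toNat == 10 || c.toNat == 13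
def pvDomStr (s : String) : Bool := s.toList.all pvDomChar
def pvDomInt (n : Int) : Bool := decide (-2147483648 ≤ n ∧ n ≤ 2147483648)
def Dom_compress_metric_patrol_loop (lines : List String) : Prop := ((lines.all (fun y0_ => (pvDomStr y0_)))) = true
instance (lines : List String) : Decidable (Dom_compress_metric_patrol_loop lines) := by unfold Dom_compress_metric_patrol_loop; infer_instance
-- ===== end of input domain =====

-- ===== PORT A =====
-- B replaces A's nested while loops by a single forward pass with a pending-run state (simpler decomposition; same O(n) cost).
-- Loops are ported as structural recursion on an explicit fuel (n+1 steps always suffice: each iteration advances the index).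

def pvIsMetricPair (line1 line2 : String) : Bool :=
  PySem.Str.startswith line1 "get_avg_erase_cnt()" && PySem.Str.startswith line2 "get_host_ns_spare_cnt()"

def pvIsPatrolBlock (line : String) : Bool :=
  PySem.Str.isIn "patrol_read() - blank block flag" line

-- inner while loop of A: counts further matching triplets from j; returns (count, j).
-- Indices are kept as Nat: i, j, n are always nonnegative in A. All list reads are in range
-- (guarded by j + 2 < n), so List.getD is exact for Python's lines[j].
def pvInnerA (lines : List String) (n : Nat) : Nat → Nat → Nat → Nat × Nat
  | 0, count, j => (count, j)
  | fuel+1, count, j =>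
    if j + 2 < n then
      if pvIsMetricPair (lines.getD j "") (lines.getD (j+1) "")
          && pvIsPatrolBlock (lines.getD (j+2) "") then
        pvInnerA lines n fuel (count+1) (j+3)
      else (count, j)
    else (count, j)

def pvMarker (count : Nat) : List String :=
  ["[" ++ PySem.Int.toStr (count : Int) ++ "x loop]",
   "{",
   "get_avg_erase_cnt() - A: *, Max: *, Min: *, t: *",
   "get_host_ns_spare_cnt() - y_avail:* spare:* host_need_spb_cnt:* host op:* unalloc pool cnt: *",
   "patrol_read() - blank block flag *, skip it",
   "}"]

-- outer while loop of A
def pvOuterA (lines : List String) (n : Nat) : Nat → Nat → List String → List String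
  | 0, _, out => out
  | fuel+1, i, out =>
    if i < n then
      if i + 2 < n then
        if pvIsMetricPair (lines.getD i "") (lines.getD (i+1) "")
            && pvIsPatrolBlock (lines.getD (i+2) "") then
          let cj := pvInnerA lines n (n+1) 1 (i+3)
          let res := if cj.1 = 1 then
              out ++ [lines.getD i "", lines.getD (i+1) "", lines.getD (i+2) ""]
            else out ++ pvMarker cj.1
          pvOuterA lines n fuel cj.2 res
        else pvOuterA lines n fuel (i+1) (out ++ [lines.getD i ""])
      else pvOuterA lines n fuel (i+1) (out ++ [lines.getD i ""])
    else out

def compress_metric_patrol_loop (lines : List String) : List String :=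
  pvOuterA lines lines.length (lines.length + 1) 0 []

-- ===== PORT B =====

-- _flush of Source B (lines[run_start:run_start+3] is exact here: run_start+2 < n whenever count ≥ 1)
def pvFlushB (lines : List String) (count rs : Nat) (out : List String) : List String :=
  if count = 1 then
    out ++ [lines.getD rs "", lines.getD (rs+1) "", lines.getD (rs+2) ""]
  else if count > 1 then
    out ++ pvMarker count
  else out

-- the combined loop condition of Source B (i + 2 < n and is_metric_pair(...) and is_patrol_block(...))
def pvTripAt (lines : List String) (n i : Nat) : Bool :=
  decide (i + 2 < n)
    && pvIsMetricPair (lines.getD i "") (lines.getD (i+1) "")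
    && pvIsPatrolBlock (lines.getD (i+2) "")

-- the single while loop of Source B, carrying the pending-run state (count, rs)
def pvGoB (lines : List String) (n : Nat) : Nat → Nat → Nat → Nat → List String → List String
  | 0, _, count, rs, out => pvFlushB lines count rs out
  | fuel+1, i, count, rs, out =>
    if i < n then
      if pvTripAt lines n i then
        pvGoB lines n fuel (i+3) (count+1) (if count = 0 then i else rs) out
      else
        pvGoB lines n fuel (i+1) 0 rs (pvFlushB lines count rs out ++ [lines.getD i ""])
    else pvFlushB lines count rs out

def compress_metric_patrol_loop_alt (lines : List String) : List String :=
  pvGoB lines lines.length (lines.length + 1) 0 0 0 []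

-- ===== PRECONDITION & SPEC =====
def Spec_compress_metric_patrol_loop (lines : List String) (out : List String) : Prop := out = compress_metric_patrol_loop_alt lines
instance (lines : List String) (out : List String) : Decidable (Spec_compress_metric_patrol_loop lines out) := by unfold Spec_compress_metric_patrol_loop; infer_instance

-- ===== CLAIM (what is proved, stated in full; the proofs are below) =====
def Claim_equal_compress_metric_patrol_loop : Prop := ∀ (lines : List String), Dom_compress_metric_patrol_loop lines → Spec_compress_metric_patrol_loop lines (compress_metric_patrol_loop lines)

-- ===== LEMMAS AND PROOFS =====

-- fuel congruence: any fuel ≥ the remaining distance computes the same value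
theorem pvInnerA_congr (lines : List String) (n : Nat) :
    ∀ f1 f2 c j, n - j ≤ f1 → n - j ≤ f2 →
      pvInnerA lines n f1 c j = pvInnerA lines n f2 c j := by
  intro f1
  induction f1 with
  | zero =>
    intro f2 c j h1 h2
    cases f2 with
    | zero => rfl
    | succ f2 =>
      simp only [pvInnerA]
      rw [if_neg (by omega)]
  | succ f1 ih =>
    intro f2 c j h1 h2
    cases f2 with
    | zero =>
      simp only [pvInnerA]
      rw [if_neg (by omega)]
    | succ f2 =>
      simp only [pvInnerA]
      split_ifs with h2' h3
      all_goals first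
        | rfl
        | exact ih f2 (c+1) (j+3) (by omega) (by omega)

-- A's inner loop never moves the index backwards
theorem pvInnerA_ge (lines : List String) (n : Nat) :
    ∀ fuel c j, j ≤ (pvInnerA lines n fuel c j).2 := by
  intro fuel
  induction fuel with
  | zero => intro c j; exact Nat.le_refl j
  | succ fuel ih =>
    intro c j
    simp only [pvInnerA]
    split_ifs with h2 h3
    · have := ih (c+1) (j+3); omega
    · exact Nat.le_refl j
    · exact Nat.le_refl j

theorem pvOuterA_congr (lines : List String) (n : Nat) :
    ∀ f1 f2 i out, n - i ≤ f1 → n - i ≤ f2 →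
      pvOuterA lines n f1 i out = pvOuterA lines n f2 i out := by
  intro f1
  induction f1 with
  | zero =>
    intro f2 i out h1 h2
    cases f2 with
    | zero => rfl
    | succ f2 =>
      simp only [pvOuterA]
      rw [if_neg (by omega)]
  | succ f1 ih =>
    intro f2 i out h1 h2
    cases f2 with
    | zero =>
      simp only [pvOuterA]
      rw [if_neg (by omega)]
    | succ f2 =>
      have hge := pvInnerA_ge lines n (n+1) 1 (i+3)
      simp only [pvOuterA]
      split_ifs with hi h2' h3
      all_goals first
        | rfl
        | exact ih f2 _ _ (by omega) (by omega)

theorem pvGoB_congr (lines : List String) (n : Nat) :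
    ∀ f1 f2 i c rs out, n - i ≤ f1 → n - i ≤ f2 →
      pvGoB lines n f1 i c rs out = pvGoB lines n f2 i c rs out := by
  intro f1
  induction f1 with
  | zero =>
    intro f2 i c rs out h1 h2
    cases f2 with
    | zero => rfl
    | succ f2 =>
      simp only [pvGoB]
      rw [if_neg (by omega)]
  | succ f1 ih =>
    intro f2 i c rs out h1 h2
    cases f2 with
    | zero =>
      simp only [pvGoB]
      rw [if_neg (by omega)]
    | succ f2 =>
      simp only [pvGoB]
      split_ifs with hi ht
      all_goals first
        | rfl
        | exact ih f2 _ _ _ _ (by omega) (by omega)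

-- characterisation of A's inner loop result (at canonical fuel n+1)
theorem pvInnerA_count_aux (lines : List String) (n : Nat) :
    ∀ fuel c j, n - j ≤ fuel →
      (pvInnerA lines n fuel c j).1 = c + ((pvInnerA lines n fuel c j).2 - j) / 3 ∧
      ((pvInnerA lines n fuel c j).2 - j) % 3 = 0 ∧
      pvTripAt lines n (pvInnerA lines n fuel c j).2 = false := by
  intro fuel
  induction fuel with
  | zero =>
    intro c j h
    refine ⟨by simp [pvInnerA], by simp [pvInnerA], ?_⟩
    simp only [pvInnerA, pvTripAt, Bool.and_eq_false_iff, decide_eq_false_iff_not]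
    left; left; omega
  | succ fuel ih =>
    intro c j h
    simp only [pvInnerA]
    split_ifs with h2 h3
    · obtain ⟨h1', h2', h3'⟩ := ih (c+1) (j+3) (by omega)
      have hge := pvInnerA_ge lines n fuel (c+1) (j+3)
      exact ⟨by omega, by omega, h3'⟩
    · refine ⟨by simp, by simp, ?_⟩
      simp only [pvTripAt, Bool.and_eq_false_iff, decide_eq_false_iff_not]
      rcases Bool.and_eq_false_iff.mp (eq_false_of_ne_true h3) with hx | hx
      · left; right; exact hx
      · right; exact hx
    · refine ⟨by simp, by simp, ?_⟩
      simp only [pvTripAt, Bool.and_eq_false_iff, decide_eq_false_iff_not]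
      left; left; omega

theorem pvInnerA_count (lines : List String) (n c j : Nat) :
    (pvInnerA lines n (n+1) c j).1 = c + ((pvInnerA lines n (n+1) c j).2 - j) / 3 ∧
    ((pvInnerA lines n (n+1) c j).2 - j) % 3 = 0 ∧
    pvTripAt lines n (pvInnerA lines n (n+1) c j).2 = false :=
  pvInnerA_count_aux lines n (n+1) c j (by omega)

-- step lemmas for A's inner loop at canonical fuel n+1, phrased through pvTripAt
theorem pvInnerA_of_trip (lines : List String) (n c j : Nat)
    (h : pvTripAt lines n j = true) :
    pvInnerA lines n (n+1) c j = pvInnerA lines n (n+1) (c+1) (j+3) := by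
  simp only [pvTripAt, Bool.and_eq_true, decide_eq_true_eq] at h
  calc pvInnerA lines n (n+1) c j
      = pvInnerA lines n n (c+1) (j+3) := by
        simp only [pvInnerA]
        rw [if_pos h.1.1, if_pos (show _ = true by rw [h.1.2, h.2]; rfl)]
    _ = pvInnerA lines n (n+1) (c+1) (j+3) :=
        pvInnerA_congr lines n n (n+1) (c+1) (j+3) (by omega) (by omega)

theorem pvInnerA_of_not_trip (lines : List String) (n c j : Nat)
    (h : pvTripAt lines n j = false) :
    pvInnerA lines n (n+1) c j = (c, j) := by
  simp only [pvInnerA]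
  split_ifs with h2 h3
  · exfalso
    simp only [pvTripAt, Bool.and_eq_false_iff, decide_eq_false_iff_not] at h
    simp only [Bool.and_eq_true] at h3
    obtain ⟨ha, hb⟩ := h3
    rcases h with (h | h) | h
    · exact h h2
    · rw [ha] at h; cases h
    · rw [hb] at h; cases h
  · rfl
  · rfl

-- step lemmas for A's outer loop at canonical fuel n+1
theorem pvOuterA_end (lines : List String) (n i : Nat) (out : List String)
    (h : ¬ i < n) : pvOuterA lines n (n+1) i out = out := by
  simp only [pvOuterA]
  rw [if_neg h]

theorem pvOuterA_step_not_trip (lines : List String) (n i : Nat) (out : List String)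
    (hi : i < n) (h : pvTripAt lines n i = false) :
    pvOuterA lines n (n+1) i out = pvOuterA lines n (n+1) (i+1) (out ++ [lines.getD i ""]) := by
  calc pvOuterA lines n (n+1) i out
      = pvOuterA lines n n (i+1) (out ++ [lines.getD i ""]) := by
        simp only [pvOuterA]
        rw [if_pos hi]
        by_cases h2 : i + 2 < n
        · have h3 : (pvIsMetricPair (lines.getD i "") (lines.getD (i+1) "")
              && pvIsPatrolBlock (lines.getD (i+2) "")) = false := by
            simp only [pvTripAt, Bool.and_eq_false_iff, decide_eq_false_iff_not] at h
            rcases h with (h | h) | h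
            · exact absurd h2 h
            · exact Bool.and_eq_false_iff.mpr (Or.inl h)
            · exact Bool.and_eq_false_iff.mpr (Or.inr h)
          rw [if_pos h2, if_neg (by rw [h3]; exact Bool.false_ne_true)]
        · rw [if_neg h2]
    _ = pvOuterA lines n (n+1) (i+1) (out ++ [lines.getD i ""]) :=
        pvOuterA_congr lines n n (n+1) (i+1) _ (by omega) (by omega)

theorem pvOuterA_step_trip (lines : List String) (n i : Nat) (out : List String)
    (hi : i < n) (h : pvTripAt lines n i = true) :
    pvOuterA lines n (n+1) i out =
      pvOuterA lines n (n+1) (pvInnerA lines n (n+1) 1 (i+3)).2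
        (if (pvInnerA lines n (n+1) 1 (i+3)).1 = 1 then
           out ++ [lines.getD i "", lines.getD (i+1) "", lines.getD (i+2) ""]
         else out ++ pvMarker (pvInnerA lines n (n+1) 1 (i+3)).1) := by
  simp only [pvTripAt, Bool.and_eq_true, decide_eq_true_eq] at h
  calc pvOuterA lines n (n+1) i out
      = pvOuterA lines n n (pvInnerA lines n (n+1) 1 (i+3)).2
          (if (pvInnerA lines n (n+1) 1 (i+3)).1 = 1 then
             out ++ [lines.getD i "", lines.getD (i+1) "", lines.getD (i+2) ""]
           else out ++ pvMarker (pvInnerA lines n (n+1) 1 (i+3)).1) := by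
        simp only [pvOuterA]
        rw [if_pos hi, if_pos h.1.1, if_pos (show _ = true by rw [h.1.2, h.2]; rfl)]
    _ = _ := pvOuterA_congr lines n n (n+1) _ _ (by omega) (by omega)

-- step lemmas for B's loop at canonical fuel n+1
theorem pvGoB_end (lines : List String) (n i c rs : Nat) (out : List String)
    (h : ¬ i < n) : pvGoB lines n (n+1) i c rs out = pvFlushB lines c rs out := by
  simp only [pvGoB]
  rw [if_neg h]

theorem pvGoB_step_trip (lines : List String) (n i c rs : Nat) (out : List String)
    (hi : i < n) (h : pvTripAt lines n i = true) :
    pvGoB lines n (n+1) i c rs out =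
      pvGoB lines n (n+1) (i+3) (c+1) (if c = 0 then i else rs) out := by
  calc pvGoB lines n (n+1) i c rs out
      = pvGoB lines n n (i+3) (c+1) (if c = 0 then i else rs) out := by
        simp only [pvGoB]
        rw [if_pos hi, if_pos h]
    _ = _ := pvGoB_congr lines n n (n+1) (i+3) _ _ _ (by omega) (by omega)

theorem pvGoB_step_not_trip (lines : List String) (n i c rs : Nat) (out : List String)
    (hi : i < n) (h : pvTripAt lines n i = false) :
    pvGoB lines n (n+1) i c rs out =
      pvGoB lines n (n+1) (i+1) 0 rs (pvFlushB lines c rs out ++ [lines.getD i ""]) := by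
  calc pvGoB lines n (n+1) i c rs out
      = pvGoB lines n n (i+1) 0 rs (pvFlushB lines c rs out ++ [lines.getD i ""]) := by
        simp only [pvGoB]
        rw [if_pos hi, if_neg (by rw [h]; exact Bool.false_ne_true)]
    _ = _ := pvGoB_congr lines n n (n+1) (i+1) _ _ _ (by omega) (by omega)

-- rs is irrelevant to pvGoB when the pending count is 0
theorem pvGoB_rs_irrel (lines : List String) (k : Nat) :
    ∀ n i rs rs' out, n - i ≤ k →
      pvGoB lines n (n+1) i 0 rs out = pvGoB lines n (n+1) i 0 rs' out := by
  induction k with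
  | zero =>
    intro n i rs rs' out h
    rw [pvGoB_end lines n i 0 rs out (by omega), pvGoB_end lines n i 0 rs' out (by omega)]
    simp [pvFlushB]
  | succ k ih =>
    intro n i rs rs' out h
    by_cases hi : i < n
    · by_cases ht : pvTripAt lines n i = true
      · rw [pvGoB_step_trip lines n i 0 rs out hi ht,
            pvGoB_step_trip lines n i 0 rs' out hi ht]
        simp
      · replace ht : pvTripAt lines n i = false := by
          cases hb : pvTripAt lines n i
          · rfl
          · exact absurd hb ht
        rw [pvGoB_step_not_trip lines n i 0 rs out hi ht,
            pvGoB_step_not_trip lines n i 0 rs' out hi ht]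
        have hfl : ∀ r, pvFlushB lines 0 r out = out := by intro r; simp [pvFlushB]
        rw [hfl, hfl]
        exact ih n (i+1) rs rs' (out ++ [lines.getD i ""]) (by omega)
    · rw [pvGoB_end lines n i 0 rs out hi, pvGoB_end lines n i 0 rs' out hi]
      simp [pvFlushB]

-- during a run: B keeps consuming triplets exactly as A's inner loop counts them
theorem pvRun (lines : List String) (k : Nat) :
    ∀ n j c rs out, n - j ≤ k → 1 ≤ c →
      pvGoB lines n (n+1) j c rs out =
        (if (pvInnerA lines n (n+1) c j).2 < n then
           pvGoB lines n (n+1) ((pvInnerA lines n (n+1) c j).2 + 1) 0 rs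
             (pvFlushB lines (pvInnerA lines n (n+1) c j).1 rs out
               ++ [lines.getD (pvInnerA lines n (n+1) c j).2 ""])
         else pvFlushB lines (pvInnerA lines n (n+1) c j).1 rs out) := by
  induction k with
  | zero =>
    intro n j c rs out h hc
    have hj : ¬ j < n := by omega
    have ht : pvTripAt lines n j = false := by
      simp only [pvTripAt, Bool.and_eq_false_iff, decide_eq_false_iff_not]
      left; left; omega
    rw [pvGoB_end lines n j c rs out hj, pvInnerA_of_not_trip lines n c j ht]
    simp [hj]
  | succ k ih =>
    intro n j c rs out h hc
    by_cases hj : j < n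
    · by_cases ht : pvTripAt lines n j = true
      · rw [pvGoB_step_trip lines n j c rs out hj ht,
            pvInnerA_of_trip lines n c j ht,
            if_neg (by omega : ¬ c = 0)]
        exact ih n (j+3) (c+1) rs out (by omega) (by omega)
      · replace ht : pvTripAt lines n j = false := by
          cases hb : pvTripAt lines n j
          · rfl
          · exact absurd hb ht
        rw [pvGoB_step_not_trip lines n j c rs out hj ht,
            pvInnerA_of_not_trip lines n c j ht]
        simp [hj]
    · have ht : pvTripAt lines n j = false := by
        simp only [pvTripAt, Bool.and_eq_false_iff, decide_eq_false_iff_not]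
        left; left; omega
      rw [pvGoB_end lines n j c rs out hj, pvInnerA_of_not_trip lines n c j ht]
      simp [hj]

theorem pvMain (lines : List String) (k : Nat) :
    ∀ n i rs out, n - i ≤ k →
      pvOuterA lines n (n+1) i out = pvGoB lines n (n+1) i 0 rs out := by
  induction k with
  | zero =>
    intro n i rs out h
    have hi : ¬ i < n := by omega
    rw [pvOuterA_end lines n i out hi, pvGoB_end lines n i 0 rs out hi]
    simp [pvFlushB]
  | succ k ih =>
    intro n i rs out h
    by_cases hi : i < n
    · by_cases ht : pvTripAt lines n i = true
      · -- a run starts at i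
        rw [pvGoB_step_trip lines n i 0 rs out hi ht, if_pos rfl]
        rw [pvRun lines (n - (i+3)) n (i+3) 1 i out (by omega) (by omega)]
        obtain ⟨hcnt, -, htf⟩ := pvInnerA_count lines n 1 (i+3)
        have hge := pvInnerA_ge lines n (n+1) 1 (i+3)
        set cj := pvInnerA lines n (n+1) 1 (i+3) with hcj
        have hflush : pvFlushB lines cj.1 i out =
            (if cj.1 = 1 then
               out ++ [lines.getD i "", lines.getD (i+1) "", lines.getD (i+2) ""]
             else out ++ pvMarker cj.1) := by
          by_cases h1 : cj.1 = 1
          · simp [pvFlushB, h1]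
          · have : cj.1 > 1 := by omega
            simp [pvFlushB, h1, this]
        rw [pvOuterA_step_trip lines n i out hi ht, ← hcj, ← hflush]
        by_cases hjn : cj.2 < n
        · rw [if_pos hjn,
              pvOuterA_step_not_trip lines n cj.2 (pvFlushB lines cj.1 i out) hjn htf]
          have := ih n (cj.2 + 1) i (pvFlushB lines cj.1 i out ++ [lines.getD cj.2 ""]) (by omega)
          rw [this, pvGoB_rs_irrel lines (n - (cj.2+1)) n (cj.2+1) i rs _ (by omega)]
        · rw [if_neg hjn, pvOuterA_end lines n cj.2 _ hjn]
      · replace ht : pvTripAt lines n i = false := by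
          cases hb : pvTripAt lines n i
          · rfl
          · exact absurd hb ht
        rw [pvOuterA_step_not_trip lines n i out hi ht,
            pvGoB_step_not_trip lines n i 0 rs out hi ht]
        have hfl : pvFlushB lines 0 rs out = out := by simp [pvFlushB]
        rw [hfl]
        exact ih n (i+1) rs (out ++ [lines.getD i ""]) (by omega)
    · rw [pvOuterA_end lines n i out hi, pvGoB_end lines n i 0 rs out hi]
      simp [pvFlushB]

-- ===== VERDICT (by name: the statement is the Claim_ definition above) =====
theorem compress_metric_patrol_loop_spec : Claim_equal_compress_metric_patrol_loop := by
  intro lines _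
  unfold Spec_compress_metric_patrol_loop compress_metric_patrol_loop compress_metric_patrol_loop_alt
  exact pvMain lines lines.length lines.length 0 0 [] (by omega)
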